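-- pv_equiv track=rewrite | github.com/Irbis174/Code-Insight | dataset/sort/insertion_sort/insertion_sort (53).py | insertion_sort_generator
-- ===== SOURCE A (Python) =====
-- def insertion_sort_generator(unsorted_seq):
--     for i, x in enumerate(unsorted_seq):
--         j = i
--         while j > 0 and unsorted_seq[j - 1] > x:
--             unsorted_seq[j] = unsorted_seq[j - 1]
--             j -= 1
--         unsorted_seq[j] = x
--         yield unsorted_seq
-- ===== SOURCE B (Python) =====
-- # In-place binary-insertion sort generator: finds each insertion point by binary
-- # search (bisect_right rule) and shifts with one slice assignment, instead of A's
-- # element-by-element while-loop scan. Mutates unsorted_seq in place and yields the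
-- # same list object after each insertion, exactly like A.
-- def insertion_sort_generator(unsorted_seq):
--     for i in range(len(unsorted_seq)):
--         key = unsorted_seq[i]
--         lo, hi = 0, i
--         while lo < hi:
--             mid = (lo + hi) // 2
--             if key < unsorted_seq[mid]:
--                 hi = mid
--             else:
--                 lo = mid + 1
--         unsorted_seq[lo + 1:i + 1] = unsorted_seq[lo:i]
--         unsorted_seq[lo] = key
--         yield unsorted_seq
-- ===== Notes on version B (the rewrite author's own statement) =====
-- stated objective: alternative
-- what changed: A scans backwards element-by-element with a while loop to place each key; B finds the insertion point with a binary search (bisect_right rule) and moves the displaced block with a single slice assignment, same in-place mutate-and-yield behaviour.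
import Mathlib
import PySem

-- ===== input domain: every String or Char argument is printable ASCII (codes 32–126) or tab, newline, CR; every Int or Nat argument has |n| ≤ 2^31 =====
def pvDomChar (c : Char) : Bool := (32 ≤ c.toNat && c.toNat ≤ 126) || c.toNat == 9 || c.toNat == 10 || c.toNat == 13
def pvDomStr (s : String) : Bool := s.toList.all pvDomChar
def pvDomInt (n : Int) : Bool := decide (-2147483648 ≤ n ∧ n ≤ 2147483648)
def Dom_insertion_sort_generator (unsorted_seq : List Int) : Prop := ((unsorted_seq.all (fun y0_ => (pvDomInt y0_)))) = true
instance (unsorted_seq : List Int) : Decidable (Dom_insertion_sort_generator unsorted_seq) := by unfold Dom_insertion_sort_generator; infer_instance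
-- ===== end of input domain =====

-- B replaces A's linear while-loop scan by a binary search for the insertion point plus a
-- block shift (same in-place, yield-each-step behaviour; same constant-factor mechanism).
-- Both Pythons MUTATE unsorted_seq in place and every `yield` hands back that same list
-- object, so a caller that materialises the generator (list(...)) observes n aliases of the
-- final sorted list; both ports model exactly that observed value (List.replicate n final).

-- ===== PORT A =====
-- the `while j > 0 and unsorted_seq[j-1] > x: unsorted_seq[j] = unsorted_seq[j-1]; j -= 1`
-- loop followed by `unsorted_seq[j] = x`, as structural recursion on j
def shiftA (seq : List Int) (x : Int) : Nat → List Int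
  | 0 => seq.set 0 x
  | j + 1 =>
    if seq.getD j 0 > x then shiftA (seq.set (j + 1) (seq.getD j 0)) x j
    else seq.set (j + 1) x

def insertion_sort_generator (unsorted_seq : List Int) : List (List Int) :=
  -- `for i, x in enumerate(unsorted_seq)` over the mutating list: at step i the entry at i
  -- is still untouched, so x = current seq[i]
  let final := (List.range unsorted_seq.length).foldl
    (fun seq i => shiftA seq (seq.getD i 0) i) unsorted_seq
  List.replicate unsorted_seq.length final

-- ===== PORT B =====
-- the `while lo < hi` binary-search loop of Source B
def bisectB (seq : List Int) (key : Int) (lo hi : Nat) : Nat :=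
  if _h : lo < hi then
    let mid := (lo + hi) / 2
    if key < seq.getD mid 0 then bisectB seq key lo mid
    else bisectB seq key (mid + 1) hi
  else lo
termination_by hi - lo
decreasing_by all_goals omega

-- `unsorted_seq[pos+1:i+1] = unsorted_seq[pos:i]; unsorted_seq[pos] = key`
def insertB (seq : List Int) (key : Int) (pos i : Nat) : List Int :=
  seq.take pos ++ key :: ((seq.drop pos).take (i - pos)) ++ seq.drop (i + 1)

def insertion_sort_generator_alt (unsorted_seq : List Int) : List (List Int) :=
  let final := (List.range unsorted_seq.length).foldl
    (fun seq i => insertB seq (seq.getD i 0) (bisectB seq (seq.getD i 0) 0 i) i) unsorted_seq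
  List.replicate unsorted_seq.length final

-- ===== PRECONDITION & SPEC =====
def Spec_insertion_sort_generator (unsorted_seq : List Int) (out : List (List Int)) : Prop := out = insertion_sort_generator_alt unsorted_seq
instance (unsorted_seq : List Int) (out : List (List Int)) : Decidable (Spec_insertion_sort_generator unsorted_seq out) := by unfold Spec_insertion_sort_generator; infer_instance

-- ===== CLAIM (what is proved, stated in full; the proofs are below) =====
def Claim_equal_insertion_sort_generator : Prop := ∀ (unsorted_seq : List Int), Dom_insertion_sort_generator unsorted_seq → Spec_insertion_sort_generator unsorted_seq (insertion_sort_generator unsorted_seq)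

-- ===== LEMMAS AND PROOFS =====

-- the first i entries of l are sorted (≤), stated on getD
def MonoPre (l : List Int) (i : Nat) : Prop :=
  ∀ a b : Nat, a ≤ b → b < i → l.getD a 0 ≤ l.getD b 0

theorem getD_take (l : List Int) (n k : Nat) (h : k < n) : (l.take n).getD k 0 = l.getD k 0 := by
  simp [List.getD_eq_getElem?_getD, h]

theorem getD_drop (l : List Int) (n k : Nat) : (l.drop n).getD k 0 = l.getD (n + k) 0 := by
  simp [List.getD_eq_getElem?_getD]

theorem getD_set (l : List Int) (m k : Nat) (v : Int) :
    (l.set m v).getD k 0 = if m = k ∧ m < l.length then v else l.getD k 0 := by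
  simp only [List.getD_eq_getElem?_getD, List.getElem?_set]
  split_ifs with h1 h2 h3 h4 <;> simp_all
  omega

theorem list_ext_getD (l1 l2 : List Int) (hl : l1.length = l2.length)
    (h : ∀ k, k < l1.length → l1.getD k 0 = l2.getD k 0) : l1 = l2 := by
  apply List.ext_getElem hl
  intro k h1 h2
  have := h k h1
  simpa [List.getD_eq_getElem, h1, h2] using this

theorem length_insertB (seq : List Int) (key : Int) (pos i : Nat)
    (hp : pos ≤ i) (hi : i < seq.length) :
    (insertB seq key pos i).length = seq.length := by
  simp [insertB]
  omega

theorem getD_insertB (seq : List Int) (key : Int) (pos i k : Nat)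
    (hp : pos ≤ i) (hi : i < seq.length) :
    (insertB seq key pos i).getD k 0 =
      if k < pos then seq.getD k 0
      else if k = pos then key
      else if k ≤ i then seq.getD (k - 1) 0
      else seq.getD k 0 := by
  unfold insertB
  have hl1 : (seq.take pos).length = pos := by simp; omega
  have hl2 : ((seq.drop pos).take (i - pos)).length = i - pos := by simp; omega
  have hL : (seq.take pos ++ key :: (seq.drop pos).take (i - pos)).length = i + 1 := by
    simp only [List.length_append, List.length_cons, hl1, hl2]; omega
  show ((seq.take pos ++ key :: (seq.drop pos).take (i - pos)) ++ seq.drop (i + 1)).getD k 0 = _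
  by_cases hk : k ≤ i
  · rw [List.getD_append _ _ _ _ (by omega)]
    by_cases h1 : k < pos
    · rw [List.getD_append _ _ _ _ (by omega), if_pos h1, getD_take _ _ _ h1]
    · rw [List.getD_append_right _ _ _ _ (by omega), if_neg h1, hl1]
      by_cases h2 : k = pos
      · simp [h2]
      · have h3 : k - pos = (k - pos - 1) + 1 := by omega
        rw [if_neg h2, h3]
        simp only [List.getD_cons_succ]
        rw [if_pos hk, getD_take _ _ _ (by omega), getD_drop]
        congr 1; omega
  · rw [List.getD_append_right _ _ _ _ (by omega), hL, getD_drop,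
        if_neg (by omega), if_neg (by omega), if_neg hk]
    congr 1; omega

-- A's backwards shift equals one block insert at pos, whenever pos already
-- separates the (≤ x) part from the (> x) part of the scanned prefix
theorem shiftA_eq_insertB (x : Int) :
    ∀ (j : Nat) (seq : List Int) (pos : Nat), j < seq.length → pos ≤ j →
      (∀ k, k < pos → seq.getD k 0 ≤ x) →
      (∀ k, pos ≤ k → k < j → x < seq.getD k 0) →
      shiftA seq x j = insertB seq x pos j := by
  intro j
  induction j with
  | zero =>
    intro seq pos hj hp _ _
    have hp0 : pos = 0 := by omega
    subst hp0
    cases seq with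
    | nil => simp at hj
    | cons a t => simp [shiftA, insertB]
  | succ j ih =>
    intro seq pos hj hp hlo hhi
    by_cases hgt : seq.getD j 0 > x
    · have hpj : pos ≤ j := by
        by_contra hc
        have hpe : pos = j + 1 := by omega
        have := hlo j (by omega)
        omega
      rw [shiftA, if_pos hgt]
      set seq' := seq.set (j + 1) (seq.getD j 0) with hseq'
      have hlen' : seq'.length = seq.length := by simp [hseq']
      have hget' : ∀ k, k ≠ j + 1 → seq'.getD k 0 = seq.getD k 0 := by
        intro k hk
        rw [hseq', getD_set, if_neg (fun h => hk h.1.symm)]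
      have h1 := ih seq' pos (by omega) hpj
        (fun k hk => by rw [hget' k (by omega)]; exact hlo k hk)
        (fun k h1 h2 => by rw [hget' k (by omega)]; exact hhi k h1 (by omega))
      rw [h1]
      apply list_ext_getD
      · rw [length_insertB _ _ _ _ hpj (by omega), length_insertB _ _ _ _ hp hj, hlen']
      · intro k hk
        rw [length_insertB _ _ _ _ hpj (by omega)] at hk
        rw [getD_insertB _ _ _ _ _ hpj (by omega), getD_insertB _ _ _ _ _ hp hj]
        by_cases c1 : k < pos
        · rw [if_pos c1, if_pos c1, hget' k (by omega)]
        · rw [if_neg c1, if_neg c1]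
          by_cases c2 : k = pos
          · rw [if_pos c2, if_pos c2]
          · rw [if_neg c2, if_neg c2]
            by_cases c3 : k ≤ j
            · rw [if_pos c3, if_pos (by omega : k ≤ j + 1), hget' (k - 1) (by omega)]
            · rw [if_neg c3]
              by_cases c4 : k = j + 1
              · rw [if_pos (by omega : k ≤ j + 1)]
                subst c4
                rw [hseq', getD_set, if_pos ⟨rfl, by omega⟩]
                simp
              · rw [if_neg (by omega : ¬ k ≤ j + 1), hget' k (by omega)]
    · have hpe : pos = j + 1 := by
        by_contra hc
        have := hhi j (by omega) (by omega)
        omega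
      subst hpe
      rw [shiftA, if_neg hgt]
      apply list_ext_getD
      · rw [List.length_set, length_insertB _ _ _ _ le_rfl hj]
      · intro k hk
        rw [List.length_set] at hk
        rw [getD_set, getD_insertB _ _ _ _ _ le_rfl hj]
        by_cases c1 : k < j + 1
        · rw [if_pos c1, if_neg (by omega)]
        · by_cases c2 : k = j + 1
          · rw [if_pos ⟨c2.symm, by omega⟩, if_neg (by omega), if_pos c2]
          · rw [if_neg (by omega), if_neg (by omega), if_neg (by omega),
                if_neg (by omega : ¬ k ≤ j + 1)]

-- the binary-search loop invariant of B
theorem bisectB_props (seq : List Int) (key : Int) (i : Nat) (hm : MonoPre seq i) :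
    ∀ (d lo hi' : Nat), hi' - lo = d → lo ≤ hi' → hi' ≤ i →
      (∀ k, k < lo → seq.getD k 0 ≤ key) →
      (∀ k, hi' ≤ k → k < i → key < seq.getD k 0) →
      bisectB seq key lo hi' ≤ hi' ∧ lo ≤ bisectB seq key lo hi' ∧
      (∀ k, k < bisectB seq key lo hi' → seq.getD k 0 ≤ key) ∧
      (∀ k, bisectB seq key lo hi' ≤ k → k < i → key < seq.getD k 0) := by
  intro d
  induction d using Nat.strong_induction_on with
  | _ d ihd =>
    intro lo hi' hd hle hhi hklo hkhi
    rw [bisectB]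
    by_cases hlt : lo < hi'
    · rw [dif_pos hlt]
      simp only
      by_cases hc : key < seq.getD ((lo + hi') / 2) 0
      · rw [if_pos hc]
        have h := ihd ((lo + hi') / 2 - lo) (by omega) lo ((lo + hi') / 2) rfl
          (by omega) (by omega) hklo
          (fun k h1 h2 => lt_of_lt_of_le hc (hm _ _ h1 h2))
        exact ⟨by omega, h.2.1, h.2.2.1, h.2.2.2⟩
      · rw [if_neg hc]
        have h := ihd (hi' - ((lo + hi') / 2 + 1)) (by omega) ((lo + hi') / 2 + 1) hi' rfl
          (by omega) hhi
          (fun k hk => le_trans (hm k ((lo + hi') / 2) (by omega) (by omega)) (not_lt.mp hc))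
          hkhi
        exact ⟨h.1, by omega, h.2.2.1, h.2.2.2⟩
    · rw [dif_neg hlt]
      exact ⟨by omega, by omega, fun k hk => hklo k (by omega),
             fun k h1 h2 => hkhi k (by omega) h2⟩

theorem monoPre_insertB (seq : List Int) (key : Int) (pos i : Nat)
    (hp : pos ≤ i) (hi : i < seq.length) (hm : MonoPre seq i)
    (hlo : ∀ k, k < pos → seq.getD k 0 ≤ key)
    (hhi : ∀ k, pos ≤ k → k < i → key < seq.getD k 0) :
    MonoPre (insertB seq key pos i) (i + 1) := by
  intro a b hab hb
  rw [getD_insertB _ _ _ _ _ hp hi, getD_insertB _ _ _ _ _ hp hi]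
  by_cases ca1 : a < pos
  · rw [if_pos ca1]
    by_cases cb1 : b < pos
    · rw [if_pos cb1]; exact hm a b hab (by omega)
    · rw [if_neg cb1]
      by_cases cb2 : b = pos
      · rw [if_pos cb2]; exact hlo a ca1
      · rw [if_neg cb2, if_pos (by omega)]
        exact hm a (b - 1) (by omega) (by omega)
  · rw [if_neg ca1]
    by_cases ca2 : a = pos
    · rw [if_pos ca2]
      by_cases cb1 : b < pos
      · omega
      · rw [if_neg cb1]
        by_cases cb2 : b = pos
        · rw [if_pos cb2]
        · rw [if_neg cb2, if_pos (by omega)]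
          exact le_of_lt (hhi (b - 1) (by omega) (by omega))
    · rw [if_neg ca2, if_pos (by omega), if_neg (by omega), if_neg (by omega),
          if_pos (by omega)]
      exact hm (a - 1) (b - 1) (by omega) (by omega)

theorem fold_eq (seq0 : List Int) :
    ∀ i, i ≤ seq0.length →
      ((List.range i).foldl (fun seq i => shiftA seq (seq.getD i 0) i) seq0 =
        (List.range i).foldl
          (fun seq i => insertB seq (seq.getD i 0) (bisectB seq (seq.getD i 0) 0 i) i) seq0) ∧
      ((List.range i).foldl
          (fun seq i => insertB seq (seq.getD i 0) (bisectB seq (seq.getD i 0) 0 i) i) seq0).length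
        = seq0.length ∧
      MonoPre ((List.range i).foldl
          (fun seq i => insertB seq (seq.getD i 0) (bisectB seq (seq.getD i 0) 0 i) i) seq0) i := by
  intro i
  induction i with
  | zero =>
    intro _
    refine ⟨rfl, rfl, ?_⟩
    intro a b _ hb
    omega
  | succ i ih =>
    intro hi1
    obtain ⟨heq, hlen, hmono⟩ := ih (by omega)
    set s := (List.range i).foldl
      (fun seq i => insertB seq (seq.getD i 0) (bisectB seq (seq.getD i 0) 0 i) i) seq0 with hs
    set key := s.getD i 0 with hkey
    set pos := bisectB s key 0 i with hpos
    have hilen : i < s.length := by omega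
    have hprops := bisectB_props s key i hmono i 0 i rfl (by omega) le_rfl
      (fun k hk => by omega) (fun k h1 h2 => by omega)
    obtain ⟨hub, _, hplo, hphi⟩ := hprops
    rw [List.range_succ, List.foldl_append, List.foldl_append, heq]
    simp only [List.foldl_cons, List.foldl_nil]
    refine ⟨?_, ?_, ?_⟩
    · rw [shiftA_eq_insertB key i s pos hilen hub hplo hphi]
    · rw [length_insertB _ _ _ _ hub hilen, hlen]
    · exact monoPre_insertB s key pos i hub hilen hmono hplo hphi

-- ===== VERDICT (by name: the statement is the Claim_ definition above) =====
theorem insertion_sort_generator_spec : Claim_equal_insertion_sort_generator := by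
  intro xs _
  unfold Spec_insertion_sort_generator insertion_sort_generator insertion_sort_generator_alt
  have h := (fold_eq xs xs.length le_rfl).1
  simp only [h]
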